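-- pv_equiv track=rewrite | github.com/patoski123/tutorial-p | conftest.py | _filter_page_fixtures
-- ===== SOURCE A (Python) =====
-- def _filter_page_fixtures(available_fixtures: list) -> list:
--     """
--     Filter fixtures that are likely to be Playwright page objects.
--
--     Prioritizes common patterns and returns them in order of preference.
--     """
--     page_patterns = [
--         'ui_page',      # Most common custom pattern
--         'page',         # Standard playwright fixture
--         'mobile_page',  # Mobile testing
--         'browser_page', # Alternative naming
--         'test_page',    # Another common pattern
--     ]
--
--     # First, check for exact matches in order of preference
--     candidates = []
--     for pattern in page_patterns:
--         if pattern in available_fixtures: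
--             candidates.append(pattern)
--
--     # Then add any other fixtures containing 'page'
--     for fixture in available_fixtures:
--         if 'page' in fixture.lower() and fixture not in candidates:
--             candidates.append(fixture)
--
--     return candidates
-- ===== SOURCE B (Python) =====
-- def _filter_page_fixtures(available_fixtures: list) -> list:
--     """Single-pass bucket sort by pattern priority instead of A's two membership passes."""
--     page_patterns = [
--         'ui_page',
--         'page',
--         'mobile_page',
--         'browser_page',
--         'test_page',
--     ]
--     priority = {p: i for i, p in enumerate(page_patterns)}
--     buckets = [[] for _ in range(len(page_patterns) + 1)]
--     seen = set()
--     for fixture in available_fixtures: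
--         if 'page' in fixture.lower() and fixture not in seen:
--             seen.add(fixture)
--             buckets[priority.get(fixture, len(page_patterns))].append(fixture)
--     result = []
--     for bucket in buckets:
--         result += bucket
--     return result
-- ===== Notes on version B (the rewrite author's own statement) =====
-- stated objective: alternative
-- what changed: A's two passes (a pattern scan using list membership, then an append loop that re-scans the growing candidates list for containment) are replaced by a single pass that drops each unseen page fixture into a priority bucket (priority looked up in a dict built from the pattern list) and then concatenates the buckets - a counting/bucket sort with a seen-set check instead of ordered membership-checked list appends.
import Mathlib
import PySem

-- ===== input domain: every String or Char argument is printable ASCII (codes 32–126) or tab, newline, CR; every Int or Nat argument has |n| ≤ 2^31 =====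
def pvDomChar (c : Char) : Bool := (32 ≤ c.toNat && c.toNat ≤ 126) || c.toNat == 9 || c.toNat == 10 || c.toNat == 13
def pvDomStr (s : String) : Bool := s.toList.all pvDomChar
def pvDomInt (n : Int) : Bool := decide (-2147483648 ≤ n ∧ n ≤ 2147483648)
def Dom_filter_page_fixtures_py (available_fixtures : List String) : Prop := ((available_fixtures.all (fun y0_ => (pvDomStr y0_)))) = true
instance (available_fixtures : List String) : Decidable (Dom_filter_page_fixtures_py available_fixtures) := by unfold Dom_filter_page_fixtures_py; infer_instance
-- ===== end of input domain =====

-- B replaces A's two passes (pattern scan with list-membership appends, then a containment-checked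
-- append loop) by a single deduplicating pass that bucket-sorts page fixtures by a pattern-priority
-- dictionary (objective: alternative).

-- shared module constant: the pattern list
def pvPatterns : List String := ["ui_page", "page", "mobile_page", "browser_page", "test_page"]

-- 'page' in fixture.lower()
def pvPg (fixture : String) : Bool := PySem.Str.isIn "page" (PySem.Str.lower fixture)

-- ===== PORT A =====
def filter_page_fixtures_py (available_fixtures : List String) : List String :=
  -- first loop: exact pattern matches, in order of preference
  let candidates : List String :=
    pvPatterns.foldl (fun candidates pattern =>
      if pattern ∈ available_fixtures then candidates ++ [pattern] else candidates) []
  -- second loop: any other fixture containing 'page'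
  available_fixtures.foldl (fun candidates fixture =>
    if pvPg fixture = true ∧ fixture ∉ candidates then candidates ++ [fixture] else candidates)
    candidates

-- ===== PORT B =====
-- priority = {p: i for i, p in enumerate(page_patterns)}
def pvPriority : PySem.Dict String Int :=
  (PySem.List.enumerate pvPatterns).foldl (fun d p => d.insert p.2 p.1) PySem.Dict.empty

-- buckets[i].append(fixture)
def pvBucketAppend (buckets : List (List String)) (i : Int) (fixture : String) : List (List String) :=
  PySem.List.pySetD buckets i (PySem.List.pyGetD buckets i [] ++ [fixture])

def filter_page_fixtures_py_alt (available_fixtures : List String) : List String :=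
  let n : Int := PySem.List.len pvPatterns
  -- one pass: each unseen page fixture goes into its priority bucket
  let st := available_fixtures.foldl
    (fun (st : List (List String) × PySem.Set String) fixture =>
      if pvPg fixture = true ∧ ¬ PySem.Set.contains st.2 fixture = true then
        (pvBucketAppend st.1 (pvPriority.getD fixture n) fixture, PySem.Set.add st.2 fixture)
      else st)
    ((PySem.List.pyRange 0 (n + 1) 1).map (fun _ => ([] : List String)), PySem.Set.empty)
  -- concatenate the buckets
  st.1.foldl (fun result bucket => result ++ bucket) []

-- ===== PRECONDITION & SPEC =====
def Spec_filter_page_fixtures_py (available_fixtures : List String) (out : List String) : Prop := out = filter_page_fixtures_py_alt available_fixtures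
instance (available_fixtures : List String) (out : List String) : Decidable (Spec_filter_page_fixtures_py available_fixtures out) := by unfold Spec_filter_page_fixtures_py; infer_instance

-- ===== CLAIM (what is proved, stated in full; the proofs are below) =====
def Claim_equal_filter_page_fixtures_py : Prop := ∀ (available_fixtures : List String), Dom_filter_page_fixtures_py available_fixtures → Spec_filter_page_fixtures_py available_fixtures (filter_page_fixtures_py available_fixtures)

-- ===== LEMMAS AND PROOFS =====

-- canonical descriptions of both programs' intermediate state:
-- the patterns present, the other page fixtures (first occurrences), the buckets, the seen set
def pvP (avail : List String) : List String := pvPatterns.filter (fun p => decide (p ∈ avail))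

def pvRest (m : List String) : List String :=
  PySem.List.dedup (m.filter (fun f => pvPg f && !(pvPatterns.contains f)))

def pvPb (m : List String) (p : String) : List String := if p ∈ m then [p] else []

def pvBucketsOf (m : List String) : List (List String) :=
  [pvPb m "ui_page", pvPb m "page", pvPb m "mobile_page", pvPb m "browser_page", pvPb m "test_page", pvRest m]

def pvSeenOf (m : List String) : PySem.Set String := PySem.Set.ofList (m.filter pvPg)

lemma pvPriority_getD (x : String) :
    pvPriority.getD x 5 =
      if x = "ui_page" then 0 else if x = "page" then 1 else if x = "mobile_page" then 2
      else if x = "browser_page" then 3 else if x = "test_page" then 4 else 5 := by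
  have h : pvPriority = PySem.Dict.mk [("ui_page",0),("page",1),("mobile_page",2),("browser_page",3),("test_page",4)] := by decide
  rw [h]
  simp only [PySem.Dict.getD, PySem.Dict.get?_mk_cons, beq_iff_eq]
  by_cases h1 : x = "ui_page" <;> by_cases h2 : x = "page" <;> by_cases h3 : x = "mobile_page" <;>
    by_cases h4 : x = "browser_page" <;> by_cases h5 : x = "test_page" <;>
    simp_all [eq_comm, PySem.Dict.get?]

lemma pvBA0 (b0 b1 b2 b3 b4 b5 : List String) (x : String) :
    pvBucketAppend [b0, b1, b2, b3, b4, b5] 0 x = [b0 ++ [x], b1, b2, b3, b4, b5] := rfl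
lemma pvBA1 (b0 b1 b2 b3 b4 b5 : List String) (x : String) :
    pvBucketAppend [b0, b1, b2, b3, b4, b5] 1 x = [b0, b1 ++ [x], b2, b3, b4, b5] := rfl
lemma pvBA2 (b0 b1 b2 b3 b4 b5 : List String) (x : String) :
    pvBucketAppend [b0, b1, b2, b3, b4, b5] 2 x = [b0, b1, b2 ++ [x], b3, b4, b5] := rfl
lemma pvBA3 (b0 b1 b2 b3 b4 b5 : List String) (x : String) :
    pvBucketAppend [b0, b1, b2, b3, b4, b5] 3 x = [b0, b1, b2, b3 ++ [x], b4, b5] := rfl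
lemma pvBA4 (b0 b1 b2 b3 b4 b5 : List String) (x : String) :
    pvBucketAppend [b0, b1, b2, b3, b4, b5] 4 x = [b0, b1, b2, b3, b4 ++ [x], b5] := rfl
lemma pvBA5 (b0 b1 b2 b3 b4 b5 : List String) (x : String) :
    pvBucketAppend [b0, b1, b2, b3, b4, b5] 5 x = [b0, b1, b2, b3, b4, b5 ++ [x]] := rfl

lemma pvOfList_append (l : List String) (y : String) :
    PySem.Set.ofList (l ++ [y]) = PySem.Set.add (PySem.Set.ofList l) y := by
  simp [PySem.Set.ofList_eq_foldl, List.foldl_append]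

lemma pvContains_seen (m : List String) (x : String) :
    PySem.Set.contains (pvSeenOf m) x = true ↔ (pvPg x = true ∧ x ∈ m) := by
  simp [PySem.Set.contains, pvSeenOf, PySem.Set.mem_ofList, List.mem_filter, and_comm]

lemma pvSeen_append (m : List String) (x : String) :
    pvSeenOf (m ++ [x]) =
      if pvPg x = true ∧ x ∉ m then pvSeenOf m ++ [x] else pvSeenOf m := by
  simp only [pvSeenOf, List.filter_append, List.filter_cons, List.filter_nil]
  by_cases hpg : pvPg x = true <;> by_cases hm : x ∈ m <;>
    simp [hpg, hm, pvOfList_append, List.mem_filter]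

lemma pvRest_append (m : List String) (x : String) :
    pvRest (m ++ [x]) =
      if pvPg x = true ∧ x ∉ pvPatterns ∧ x ∉ m then pvRest m ++ [x] else pvRest m := by
  simp only [pvRest, PySem.List.dedup_eq_ofList, List.filter_append, List.filter_cons,
    List.filter_nil]
  by_cases hpg : pvPg x = true <;> by_cases hpat : x ∈ pvPatterns <;> by_cases hm : x ∈ m <;>
    simp [hpg, hpat, hm, pvOfList_append, List.mem_filter]

lemma pvPb_append (m : List String) (x p : String) :
    pvPb (m ++ [x]) p = if p = x ∨ p ∈ m then [p] else [] := by
  simp [pvPb, List.mem_append, or_comm]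

-- one step of B's loop advances the canonical state
lemma pvStep (m : List String) (x : String) :
    (if pvPg x = true ∧ ¬ PySem.Set.contains (pvSeenOf m) x = true then
        (pvBucketAppend (pvBucketsOf m) (pvPriority.getD x 5) x, PySem.Set.add (pvSeenOf m) x)
      else (pvBucketsOf m, pvSeenOf m))
    = (pvBucketsOf (m ++ [x]), pvSeenOf (m ++ [x])) := by
  have hBO : pvBucketsOf (m ++ [x]) =
      [pvPb (m ++ [x]) "ui_page", pvPb (m ++ [x]) "page", pvPb (m ++ [x]) "mobile_page",
       pvPb (m ++ [x]) "browser_page", pvPb (m ++ [x]) "test_page", pvRest (m ++ [x])] := rfl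
  by_cases hpg : pvPg x = true
  · by_cases hm : x ∈ m
    · -- already seen: nothing changes
      have hc : PySem.Set.contains (pvSeenOf m) x = true := (pvContains_seen m x).mpr ⟨hpg, hm⟩
      rw [if_neg (fun h => h.2 hc), pvSeen_append, if_neg (by simp [hm])]
      rw [hBO, pvRest_append, if_neg (by simp [hm])]
      simp only [pvBucketsOf, pvPb_append]
      have hmm : ∀ p : String, (p = x ∨ p ∈ m) ↔ p ∈ m := by
        intro p
        exact ⟨fun h => h.elim (fun h => h ▸ hm) id, Or.inr⟩
      simp [pvPb, hmm]
    · -- new page fixture: goes into its bucket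
      have hc : ¬ PySem.Set.contains (pvSeenOf m) x = true := by
        simp only [pvContains_seen]; exact fun h => hm h.2
      rw [if_pos ⟨hpg, hc⟩, pvSeenOf, pvSeenOf, List.filter_append, List.filter_cons,
        List.filter_nil, hpg]
      simp only [if_true, pvOfList_append]
      by_cases hpat : x ∈ pvPatterns
      · have hrest : pvRest (m ++ [x]) = pvRest m := by
          rw [pvRest_append, if_neg (by simp [hpat])]
        rw [hBO, hrest, pvPb_append, pvPb_append, pvPb_append, pvPb_append, pvPb_append]
        simp only [pvPatterns, List.mem_cons, List.not_mem_nil, or_false] at hpat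
        rcases hpat with rfl | rfl | rfl | rfl | rfl
        · rw [show pvPriority.getD "ui_page" 5 = (0 : Int) by decide]
          simp only [pvBucketsOf]; rw [pvBA0]; simp [pvPb, hm]
        · rw [show pvPriority.getD "page" 5 = (1 : Int) by decide]
          simp only [pvBucketsOf]; rw [pvBA1]; simp [pvPb, hm]
        · rw [show pvPriority.getD "mobile_page" 5 = (2 : Int) by decide]
          simp only [pvBucketsOf]; rw [pvBA2]; simp [pvPb, hm]
        · rw [show pvPriority.getD "browser_page" 5 = (3 : Int) by decide]
          simp only [pvBucketsOf]; rw [pvBA3]; simp [pvPb, hm]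
        · rw [show pvPriority.getD "test_page" 5 = (4 : Int) by decide]
          simp only [pvBucketsOf]; rw [pvBA4]; simp [pvPb, hm]
      · have hrest : pvRest (m ++ [x]) = pvRest m ++ [x] := by
          rw [pvRest_append, if_pos ⟨hpg, hpat, hm⟩]
        rw [hBO, hrest, pvPb_append, pvPb_append, pvPb_append, pvPb_append, pvPb_append]
        have hx5 : pvPriority.getD x 5 = 5 := by
          simp only [pvPatterns, List.mem_cons, List.not_mem_nil, or_false, not_or] at hpat
          obtain ⟨h1, h2, h3, h4, h5⟩ := hpat
          simp [pvPriority_getD, h1, h2, h3, h4, h5]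
        have hne : ∀ p ∈ pvPatterns, ¬ (p = x) := fun p hp he => hpat (he ▸ hp)
        rw [hx5]
        simp only [pvBucketsOf]; rw [pvBA5]
        simp [pvPb, hne "ui_page" (by simp [pvPatterns]), hne "page" (by simp [pvPatterns]),
          hne "mobile_page" (by simp [pvPatterns]), hne "browser_page" (by simp [pvPatterns]),
          hne "test_page" (by simp [pvPatterns])]
  · -- not a page fixture: nothing changes
    rw [if_neg (by simp [hpg]), pvSeen_append, if_neg (by simp [hpg])]
    rw [hBO, pvRest_append, if_neg (by simp [hpg])]
    have hxp : x ∉ pvPatterns := by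
      intro h
      simp only [pvPatterns, List.mem_cons, List.not_mem_nil, or_false] at h
      rcases h with rfl | rfl | rfl | rfl | rfl <;> revert hpg <;> decide
    have hne : ∀ p ∈ pvPatterns, ¬ (p = x) := fun p hp he => hxp (he ▸ hp)
    simp only [pvBucketsOf, pvPb_append]
    simp [pvPb, hne "ui_page" (by simp [pvPatterns]), hne "page" (by simp [pvPatterns]),
      hne "mobile_page" (by simp [pvPatterns]), hne "browser_page" (by simp [pvPatterns]),
      hne "test_page" (by simp [pvPatterns])]

-- B's loop, run from any processed prefix m, lands on the canonical state
lemma pvAltFold (l m : List String) :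
    l.foldl
      (fun (st : List (List String) × PySem.Set String) fixture =>
        if pvPg fixture = true ∧ ¬ PySem.Set.contains st.2 fixture = true then
          (pvBucketAppend st.1 (pvPriority.getD fixture 5) fixture, PySem.Set.add st.2 fixture)
        else st)
      (pvBucketsOf m, pvSeenOf m)
    = (pvBucketsOf (m ++ l), pvSeenOf (m ++ l)) := by
  induction l generalizing m with
  | nil => simp
  | cons x l ih =>
      simp only [List.foldl_cons]
      rw [pvStep m x, ih]
      simp

lemma pvAlt_eq (avail : List String) :
    filter_page_fixtures_py_alt avail = pvP avail ++ pvRest avail := by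
  unfold filter_page_fixtures_py_alt
  have hn : PySem.List.len pvPatterns = 5 := by decide
  simp only [hn]
  have hinit : ((PySem.List.pyRange 0 ((5 : Int) + 1) 1).map (fun _ => ([] : List String)),
      (PySem.Set.empty : PySem.Set String)) = (pvBucketsOf [], pvSeenOf []) := by decide
  rw [hinit, pvAltFold avail ([] : List String)]
  simp only [List.nil_append, pvBucketsOf, List.foldl]
  by_cases h1 : "ui_page" ∈ avail <;> by_cases h2 : "page" ∈ avail <;>
    by_cases h3 : "mobile_page" ∈ avail <;> by_cases h4 : "browser_page" ∈ avail <;>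
    by_cases h5 : "test_page" ∈ avail <;>
    simp [pvPb, pvP, pvPatterns, List.filter, h1, h2, h3, h4, h5]

-- A's second loop started on P ++ r keeps the prefix P and appends after it
lemma pvA_split (P : List String) (l : List String) :
    ∀ r : List String,
      l.foldl (fun c f => if pvPg f = true ∧ f ∉ c then c ++ [f] else c) (P ++ r)
      = P ++ l.foldl (fun r f => if pvPg f = true ∧ f ∉ P ∧ f ∉ r then r ++ [f] else r) r := by
  induction l with
  | nil => intro r; rfl
  | cons x l ih =>
      intro r
      simp only [List.foldl_cons, List.mem_append, not_or]
      by_cases hpg : pvPg x = true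
      · by_cases hP : x ∈ P
        · simp [hpg, hP, ih]
        · by_cases hr : x ∈ r
          · simp [hpg, hP, hr, ih]
          · simp [hpg, hP, hr, ← ih, List.append_assoc]
      · simp [hpg, ih]

lemma pvA_eq (avail : List String) :
    filter_page_fixtures_py avail = pvP avail ++ pvRest avail := by
  unfold filter_page_fixtures_py
  have h1 : pvPatterns.foldl (fun c p => if p ∈ avail then c ++ [p] else c) [] = pvP avail := by
    by_cases h1 : "ui_page" ∈ avail <;> by_cases h2 : "page" ∈ avail <;>
      by_cases h3 : "mobile_page" ∈ avail <;> by_cases h4 : "browser_page" ∈ avail <;>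
      by_cases h5 : "test_page" ∈ avail <;>
      simp [pvPatterns, pvP, List.filter, h1, h2, h3, h4, h5]
  simp only [h1]
  have h2 := pvA_split (pvP avail) avail []
  rw [List.append_nil] at h2
  rw [h2]
  congr 1
  rw [PySem.List.foldl_congr_mem avail _
    (fun r f => if pvPg f = true ∧ f ∉ pvPatterns ∧ f ∉ r then r ++ [f] else r) []
    (by
      intro acc x hx
      have : (x ∉ pvP avail) ↔ (x ∉ pvPatterns) := by
        simp [pvP, List.mem_filter, hx]
      rw [if_congr (by rw [this]) rfl rfl])]
  rw [pvRest, PySem.List.dedup_eq_ofList, PySem.Set.ofList_eq_foldl, List.foldl_filter]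
  exact PySem.List.foldl_congr_mem avail _ _ []
    (by
      intro acc x hx
      by_cases hpg : pvPg x = true <;> by_cases hpat : x ∈ pvPatterns <;>
        by_cases hacc : x ∈ acc <;>
        simp [hpg, hpat, hacc, PySem.Set.add, PySem.Set.contains])

-- ===== VERDICT (by name: the statement is the Claim_ definition above) =====
theorem filter_page_fixtures_py_spec : Claim_equal_filter_page_fixtures_py := by
  intro avail _
  unfold Spec_filter_page_fixtures_py
  rw [pvA_eq, pvAlt_eq]
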